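-- pv_equiv track=rewrite | github.com/Samyakmedhe/Python_Assignment | Assignment20__python/Assignment_5.py | Productodd
-- ===== SOURCE A (Python) =====
-- def Productodd(Arr , iLenght):
--     iMulti = 1
--     oddFound = False
--     for iCnt in range(iLenght):
--         if(Arr[iCnt] % 2 != 0):
--             iMulti = iMulti * Arr[iCnt]
--             oddFound = True
--     if oddFound == True:
--         return iMulti
--     else:
--         return 0
-- ===== SOURCE B (Python) =====
-- def Productodd(Arr, iLenght):
--     odds = [x for x in Arr[:max(iLenght, 0)] if x % 2 != 0]
--     if not odds:
--         return 0
--     result = odds[0]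
--     for x in odds[1:]:
--         result *= x
--     return result
-- ===== Notes on version B (the rewrite author's own statement) =====
-- stated objective: simpler
-- what changed: Replaces the flag-carrying index loop by a two-phase decomposition: filter the first iLenght elements for odd values, then return 0 on an empty list or the product seeded by the first odd element (no oddFound boolean, no initial 1, no indexing).
import Mathlib
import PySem

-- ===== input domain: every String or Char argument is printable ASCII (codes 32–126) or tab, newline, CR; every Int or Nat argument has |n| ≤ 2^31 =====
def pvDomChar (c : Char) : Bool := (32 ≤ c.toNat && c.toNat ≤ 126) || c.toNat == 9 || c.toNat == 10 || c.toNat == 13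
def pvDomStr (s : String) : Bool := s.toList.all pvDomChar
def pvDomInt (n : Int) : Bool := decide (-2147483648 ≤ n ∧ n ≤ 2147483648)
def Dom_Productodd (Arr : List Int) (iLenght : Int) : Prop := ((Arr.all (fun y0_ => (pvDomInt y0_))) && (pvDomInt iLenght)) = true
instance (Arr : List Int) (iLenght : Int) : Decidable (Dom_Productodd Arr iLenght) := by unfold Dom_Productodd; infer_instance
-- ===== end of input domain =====

-- B replaces A's flag-carrying index loop by filter-the-odds then product-seeded-by-the-first (simpler decomposition; same cost).


-- ===== PORT A =====
-- literal port: for iCnt in range(iLenght): if Arr[iCnt] % 2 != 0: iMulti *= Arr[iCnt]; oddFound = True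
-- (pyGetD's default is never read inside Pre_, where every index of range(iLenght) is in range)
def Productodd (Arr : List Int) (iLenght : Int) : Int :=
  let st := (PySem.List.pyRange 0 iLenght 1).foldl
    (fun (s : Int × Bool) iCnt =>
      if PySem.Int.mod (PySem.List.pyGetD Arr iCnt 0) 2 ≠ 0 then
        (s.1 * PySem.List.pyGetD Arr iCnt 0, true)
      else s) (1, false)
  if st.2 then st.1 else 0

-- ===== PORT B =====
-- odds = [x for x in Arr[:max(iLenght, 0)] if x % 2 != 0]; empty → 0, else fold * over odds[1:] from odds[0]
def Productodd_alt (Arr : List Int) (iLenght : Int) : Int :=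
  let odds := (PySem.List.slice Arr none (some (max iLenght 0))).filter
    (fun x => PySem.Int.mod x 2 ≠ 0)
  match odds with
  | [] => 0
  | h :: t => t.foldl (· * ·) h

-- ===== PRECONDITION & SPEC =====
-- Pre_ excludes exactly the inputs where A raises IndexError (iLenght > len(Arr)).
def Pre_Productodd (Arr : List Int) (iLenght : Int) : Prop := iLenght ≤ (Arr.length : Int)
instance (Arr : List Int) (iLenght : Int) : Decidable (Pre_Productodd Arr iLenght) := by unfold Pre_Productodd; infer_instance
def pvWitness_Productodd : List Int × Int := ([2, 3, 5], 3)

def Spec_Productodd (Arr : List Int) (iLenght : Int) (out : Int) : Prop := out = Productodd_alt Arr iLenght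
instance (Arr : List Int) (iLenght : Int) (out : Int) : Decidable (Spec_Productodd Arr iLenght out) := by unfold Spec_Productodd; infer_instance

-- ===== CLAIM (what is proved, stated in full; the proofs are below) =====
def Claim_equal_Productodd : Prop := ∀ (Arr : List Int) (iLenght : Int), Dom_Productodd Arr iLenght → Pre_Productodd Arr iLenght → Spec_Productodd Arr iLenght (Productodd Arr iLenght)

-- ===== LEMMAS AND PROOFS =====

def pvOdd (x : Int) : Bool := PySem.Int.mod x 2 ≠ 0

-- A's fold over range(n) computes (m * product of odds of take n, b || odds ≠ [])
theorem pvFoldA (Arr : List Int) (n : Nat) (h : n ≤ Arr.length) (m : Int) (b : Bool) :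
    (PySem.List.pyRange 0 (n : Int) 1).foldl
      (fun (s : Int × Bool) iCnt =>
        if PySem.Int.mod (PySem.List.pyGetD Arr iCnt 0) 2 ≠ 0 then
          (s.1 * PySem.List.pyGetD Arr iCnt 0, true)
        else s) (m, b) =
      (m * ((Arr.take n).filter pvOdd).prod, b || !((Arr.take n).filter pvOdd).isEmpty) := by
  induction n generalizing m b with
  | zero => simp [PySem.List.pyRange_one_eq_nil]
  | succ k ih =>
    have hk : k < Arr.length := h
    have hsplit : PySem.List.pyRange 0 ((k : Int) + 1) 1 =
        PySem.List.pyRange 0 (k : Int) 1 ++ [(k : Int)] :=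
      PySem.List.pyRange_one_succ_right (by positivity)
    have htake : Arr.take (k + 1) = Arr.take k ++ [Arr[k]] := by
      rw [List.take_add_one, List.getElem?_eq_getElem hk]; rfl
    have hmod : PySem.Int.mod Arr[k] 2 = Arr[k] % 2 :=
      PySem.Int.mod_eq_emod_of_pos (by norm_num)
    push_cast
    rw [hsplit, List.foldl_append, ih (by omega), htake, List.filter_append]
    simp only [List.foldl_cons, List.foldl_nil, PySem.List.pyGetD_natCast,
      List.getD_eq_getElem?_getD, List.getElem?_eq_getElem hk, Option.getD_some]
    by_cases ho : Arr[k] % 2 = 1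
    · simp [pvOdd, ho, mul_assoc]
    · have ho0 : Arr[k] % 2 = 0 := by omega
      simp [pvOdd, ho0]

-- folding * over t from h is h * t.prod
theorem pvFoldMul (t : List Int) (h : Int) : t.foldl (· * ·) h = h * t.prod := by
  induction t generalizing h with
  | nil => simp
  | cons x xs ih => simp [List.foldl_cons, ih, mul_assoc]

-- ===== VERDICT (by name: the statement is the Claim_ definition above) =====
theorem Productodd_spec : Claim_equal_Productodd := by
  intro Arr iLenght _ hpre
  unfold Spec_Productodd Productodd Productodd_alt
  by_cases hneg : iLenght ≤ 0
  · have hm : max iLenght 0 = ((0 : Nat) : Int) := by omega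
    rw [hm, PySem.List.slice_to_natCast]
    simp [PySem.List.pyRange_one_eq_nil hneg]
  · have hlen : iLenght.toNat ≤ Arr.length := by
      unfold Pre_Productodd at hpre; omega
    have hn : iLenght = ((iLenght.toNat : Nat) : Int) := by omega
    have hm : max iLenght 0 = ((iLenght.toNat : Nat) : Int) := by omega
    rw [hm, PySem.List.slice_to_natCast, hn]
    simp only [pvFoldA Arr iLenght.toNat hlen 1 false, Int.toNat_natCast]
    have hl : (fun x : Int => decide (PySem.Int.mod x 2 ≠ 0)) = pvOdd := rfl
    rw [hl]
    cases hodds : (Arr.take iLenght.toNat).filter pvOdd with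
    | nil => simp
    | cons h t => simp [pvFoldMul]
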